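-- pv_equiv track=rewrite | github.com/molly5617/NTU-CV | HW10/HW10.py | expan
-- ===== SOURCE A (Python) =====
-- def expan(arr):
--     m=len(arr)
--     n=len(arr[0])
--     res=res=[[0]*(n+2) for i in range(m+2)]
--     for i in range(1,m+1):
--         res[i][0]=arr[i-1][0]
--         res[i][n+1]=arr[i-1][n-1]
--     for j in range(1,n+1):
--         res[0][j]=arr[0][j-1]
--         res[m+1][j]=arr[m-1][j-1]
--     res[0][0]=arr[0][0]
--     res[0][n+1]=arr[0][n-1]
--     res[m+1][0]=arr[m-1][0]
--     res[m+1][n+1]=arr[m-1][n-1]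
--     for i in range(1,m+1):
--         for j in range(1,n+1):
--             res[i][j]=arr[i-1][j-1]
--     return res
-- ===== SOURCE B (Python) =====
-- def expan(arr):
--     m = len(arr)
--     n = len(arr[0])
--     def clamp(x, hi):
--         return max(0, min(x, hi))
--     return [[arr[clamp(i - 1, m - 1)][clamp(j - 1, n - 1)] for j in range(n + 2)]
--             for i in range(m + 2)]
-- ===== Notes on version B (the rewrite author's own statement) =====
-- stated objective: simpler
-- what changed: Replaces A's zero-initialised grid plus four border loops, four corner assignments and an interior double loop with a single nested comprehension where every padded cell reads arr[clamp(i-1,0,m-1)][clamp(j-1,0,n-1)].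
import Mathlib
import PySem

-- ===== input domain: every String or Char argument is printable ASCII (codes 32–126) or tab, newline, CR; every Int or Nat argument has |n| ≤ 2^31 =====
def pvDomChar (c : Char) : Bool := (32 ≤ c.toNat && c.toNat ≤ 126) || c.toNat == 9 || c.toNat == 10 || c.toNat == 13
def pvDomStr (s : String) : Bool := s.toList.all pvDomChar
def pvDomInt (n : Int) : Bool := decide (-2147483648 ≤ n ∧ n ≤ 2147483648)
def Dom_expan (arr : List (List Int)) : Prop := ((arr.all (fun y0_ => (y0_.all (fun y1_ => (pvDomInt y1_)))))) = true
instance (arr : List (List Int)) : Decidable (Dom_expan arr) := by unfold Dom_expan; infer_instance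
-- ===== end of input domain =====

-- B replaces A's border loops, corner assignments and interior double loop with one
-- uniform index-clamping nested comprehension (objective: simpler).

-- ===== PORT A =====
-- arr[i][j] read (in-range on Pre_; `getD` defaults are unreachable there)
def get2 (r : List (List Int)) (i j : Nat) : Int := (r.getD i []).getD j 0
-- res[i][j] = v (Python writes are always in range here)
def set2 (r : List (List Int)) (i j : Nat) (v : Int) : List (List Int) :=
  r.set i ((r.getD i []).set j v)

-- literal port of A: zero grid, two border loops (range(1,m+1) iterated as k+1 for
-- k in range m), four corner writes, interior double loop
def expan (arr : List (List Int)) : List (List Int) :=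
  let m := arr.length
  let n := (arr.getD 0 []).length
  let res0 := List.replicate (m+2) (List.replicate (n+2) (0:Int))
  let res1 := (List.range m).foldl (fun r k =>
      set2 (set2 r (k+1) 0 (get2 arr k 0)) (k+1) (n+1) (get2 arr k (n-1))) res0
  let res2 := (List.range n).foldl (fun r k =>
      set2 (set2 r 0 (k+1) (get2 arr 0 k)) (m+1) (k+1) (get2 arr (m-1) k)) res1
  let res3 := set2 res2 0 0 (get2 arr 0 0)
  let res4 := set2 res3 0 (n+1) (get2 arr 0 (n-1))
  let res5 := set2 res4 (m+1) 0 (get2 arr (m-1) 0)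
  let res6 := set2 res5 (m+1) (n+1) (get2 arr (m-1) (n-1))
  (List.range m).foldl (fun r i =>
      (List.range n).foldl (fun r' j => set2 r' (i+1) (j+1) (get2 arr i j)) r) res6

-- ===== PORT B =====
-- literal port of Source B; Python's clamp(x,hi) = max(0,min(x,hi)) on index i-1 equals
-- Nat `min (i-1) hi` here since truncated subtraction already gives 0 at i = 0
def expan_alt (arr : List (List Int)) : List (List Int) :=
  let m := arr.length
  let n := (arr.getD 0 []).length
  (List.range (m+2)).map (fun i =>
    (List.range (n+2)).map (fun j =>
      (arr.getD (min (i-1) (m-1)) []).getD (min (j-1) (n-1)) 0))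

-- ===== PRECONDITION & SPEC =====
-- Pre_ excludes exactly the inputs where Python A raises IndexError: the empty list,
-- an empty first row, and rows shorter than the first row.
def Pre_expan (arr : List (List Int)) : Prop :=
  arr ≠ [] ∧ 0 < (arr.getD 0 []).length ∧
    ∀ row ∈ arr, (arr.getD 0 []).length ≤ row.length
instance (arr : List (List Int)) : Decidable (Pre_expan arr) := by
  unfold Pre_expan; infer_instance
def pvWitness_expan : List (List Int) := [[1, 2], [3, 4]]
def Spec_expan (arr : List (List Int)) (out : List (List Int)) : Prop := out = expan_alt arr
instance (arr : List (List Int)) (out : List (List Int)) : Decidable (Spec_expan arr out) := by unfold Spec_expan; infer_instance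

-- ===== CLAIM (what is proved, stated in full; the proofs are below) =====
def Claim_equal_expan : Prop := ∀ (arr : List (List Int)), Dom_expan arr → Pre_expan arr → Spec_expan arr (expan arr)

-- ===== LEMMAS AND PROOFS =====

-- shape invariant: M rows, every (in-range) row of length N
def Shape (r : List (List Int)) (M N : Nat) : Prop :=
  r.length = M ∧ ∀ k < M, (r.getD k []).length = N

theorem length_set2 (r : List (List Int)) (i j : Nat) (v : Int) :
    (set2 r i j v).length = r.length := by
  simp [set2]

theorem row_set2_ne (r : List (List Int)) (i j : Nat) (v : Int) (k : Nat) (h : k ≠ i) :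
    (set2 r i j v).getD k [] = r.getD k [] := by
  unfold set2
  simp only [List.getD_eq_getElem?_getD]
  rw [List.getElem?_set_ne (Ne.symm h)]

theorem row_set2_self (r : List (List Int)) (i j : Nat) (v : Int) (hi : i < r.length) :
    (set2 r i j v).getD i [] = (r.getD i []).set j v := by
  unfold set2
  rw [List.getD_eq_getElem?_getD, List.getElem?_set_self hi]
  rfl

theorem shape_set2 {r : List (List Int)} {M N : Nat} (h : Shape r M N) (i j : Nat) (v : Int) :
    Shape (set2 r i j v) M N := by
  obtain ⟨h1, h2⟩ := h
  refine ⟨by simp [length_set2, h1], fun k hk => ?_⟩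
  by_cases hki : k = i
  · subst hki
    by_cases hlt : k < r.length
    · rw [row_set2_self r k j v hlt, List.length_set]; exact h2 k hk
    · omega
  · rw [row_set2_ne r i j v k hki]; exact h2 k hk

theorem shape_foldl {α : Type} {M N : Nat} (f : List (List Int) → α → List (List Int))
    (hf : ∀ r a, Shape r M N → Shape (f r a) M N) :
    ∀ (l : List α) (r : List (List Int)), Shape r M N → Shape (l.foldl f r) M N := by
  intro l
  induction l with
  | nil => intro r h; exact h
  | cons a t ih => intro r h; exact ih (f r a) (hf r a h)

theorem get2_set2_ne (r : List (List Int)) (i j : Nat) (v : Int) (i' j' : Nat)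
    (h : i' ≠ i ∨ j' ≠ j) : get2 (set2 r i j v) i' j' = get2 r i' j' := by
  unfold get2
  by_cases hi : i' = i
  · subst hi
    have hj : j' ≠ j := by tauto
    by_cases hlt : i' < r.length
    · rw [row_set2_self r i' j v hlt]
      simp only [List.getD_eq_getElem?_getD]
      rw [List.getElem?_set_ne (Ne.symm hj)]
    · have heq : set2 r i' j v = r := by
        unfold set2; exact List.set_eq_of_length_le (by omega)
      rw [heq]
  · rw [row_set2_ne r i j v i' hi]

theorem get2_set2_self (r : List (List Int)) (i j : Nat) (v : Int)
    (hi : i < r.length) (hj : j < (r.getD i []).length) :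
    get2 (set2 r i j v) i j = v := by
  unfold get2
  rw [row_set2_self r i j v hi, List.getD_eq_getElem?_getD, List.getElem?_set_self hj]
  rfl

-- loop 1: writes columns 0 and n+1 of rows 1..m
theorem loop1_get2 (arr : List (List Int)) (n M N : Nat) (hN : n + 1 < N) :
    ∀ (m : Nat) (r : List (List Int)), m + 1 ≤ M → Shape r M N → ∀ i j,
      get2 ((List.range m).foldl (fun r k =>
        set2 (set2 r (k+1) 0 (get2 arr k 0)) (k+1) (n+1) (get2 arr k (n-1))) r) i j =
      if 1 ≤ i ∧ i ≤ m ∧ j = 0 then get2 arr (i-1) 0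
      else if 1 ≤ i ∧ i ≤ m ∧ j = n+1 then get2 arr (i-1) (n-1)
      else get2 r i j := by
  intro m
  induction m with
  | zero =>
    intro r _ _ i j
    simp only [List.range_zero, List.foldl_nil]
    split_ifs with h1 h2 <;> first | rfl | omega
  | succ m ih =>
    intro r hM hr i j
    rw [List.range_succ, List.foldl_append, List.foldl_cons, List.foldl_nil]
    set r' := (List.range m).foldl (fun r k =>
      set2 (set2 r (k+1) 0 (get2 arr k 0)) (k+1) (n+1) (get2 arr k (n-1))) r with hr'def
    have hshape' : Shape r' M N :=
      shape_foldl _ (fun r k h => shape_set2 (shape_set2 h _ _ _) _ _ _) _ r hr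
    have hA : (set2 r' (m+1) 0 (get2 arr m 0)).length = M := by
      rw [length_set2]; exact hshape'.1
    have hB : ((set2 r' (m+1) 0 (get2 arr m 0)).getD (m+1) []).length = N :=
      (shape_set2 hshape' _ _ _).2 (m+1) (by omega)
    have hC : r'.length = M := hshape'.1
    have hD : (r'.getD (m+1) []).length = N := hshape'.2 (m+1) (by omega)
    by_cases him : i = m + 1
    · subst him
      by_cases hj0 : j = 0
      · subst hj0
        rw [get2_set2_ne _ _ _ _ _ _ (Or.inr (by omega)),
          get2_set2_self _ _ _ _ (by omega) (by omega)]
        have hcond : 1 ≤ m+1 ∧ m+1 ≤ m+1 ∧ (0:Nat) = 0 := by omega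
        rw [if_pos hcond]
        simp
      · by_cases hjn : j = n + 1
        · subst hjn
          rw [get2_set2_self _ _ _ _ (by omega) (by omega)]
          have hc1 : ¬ (1 ≤ m+1 ∧ m+1 ≤ m+1 ∧ n+1 = 0) := by omega
          have hc2 : 1 ≤ m+1 ∧ m+1 ≤ m+1 ∧ n+1 = n+1 := by omega
          rw [if_neg hc1, if_pos hc2]
          simp
        · rw [get2_set2_ne _ _ _ _ _ _ (Or.inr hjn),
            get2_set2_ne _ _ _ _ _ _ (Or.inr hj0),
            ih r (by omega) hr]
          split_ifs with h1 h2 h3 h4 <;> first | rfl | omega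
    · rw [get2_set2_ne _ _ _ _ _ _ (Or.inl him),
        get2_set2_ne _ _ _ _ _ _ (Or.inl him), ih r (by omega) hr]
      split_ifs with h1 h2 h3 h4 <;> first | rfl | omega

-- loop 2: writes rows 0 and m+1 of columns 1..n
theorem loop2_get2 (arr : List (List Int)) (m M N : Nat) (hM : m + 1 < M) :
    ∀ (n : Nat) (r : List (List Int)), n + 1 ≤ N → Shape r M N → ∀ i j,
      get2 ((List.range n).foldl (fun r k =>
        set2 (set2 r 0 (k+1) (get2 arr 0 k)) (m+1) (k+1) (get2 arr (m-1) k)) r) i j =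
      if i = 0 ∧ 1 ≤ j ∧ j ≤ n then get2 arr 0 (j-1)
      else if i = m+1 ∧ 1 ≤ j ∧ j ≤ n then get2 arr (m-1) (j-1)
      else get2 r i j := by
  intro n
  induction n with
  | zero =>
    intro r _ _ i j
    simp only [List.range_zero, List.foldl_nil]
    split_ifs with h1 h2 <;> first | rfl | omega
  | succ n ih =>
    intro r hN hr i j
    rw [List.range_succ, List.foldl_append, List.foldl_cons, List.foldl_nil]
    set r' := (List.range n).foldl (fun r k =>
      set2 (set2 r 0 (k+1) (get2 arr 0 k)) (m+1) (k+1) (get2 arr (m-1) k)) r with hr'def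
    have hshape' : Shape r' M N :=
      shape_foldl _ (fun r k h => shape_set2 (shape_set2 h _ _ _) _ _ _) _ r hr
    have hA : (set2 r' 0 (n+1) (get2 arr 0 n)).length = M := by
      rw [length_set2]; exact hshape'.1
    have hB : ((set2 r' 0 (n+1) (get2 arr 0 n)).getD (m+1) []).length = N :=
      (shape_set2 hshape' _ _ _).2 (m+1) (by omega)
    have hC : r'.length = M := hshape'.1
    have hD : (r'.getD 0 []).length = N := hshape'.2 0 (by omega)
    by_cases hjn : j = n + 1
    · subst hjn
      by_cases hi0 : i = 0
      · subst hi0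
        rw [get2_set2_ne _ _ _ _ _ _ (Or.inl (by omega)),
          get2_set2_self _ _ _ _ (by omega) (by omega)]
        have hcond : (0:Nat) = 0 ∧ 1 ≤ n+1 ∧ n+1 ≤ n+1 := by omega
        rw [if_pos hcond]
        simp
      · by_cases him : i = m + 1
        · subst him
          rw [get2_set2_self _ _ _ _ (by omega) (by omega)]
          have hc1 : ¬ ((m+1 : Nat) = 0 ∧ 1 ≤ n+1 ∧ n+1 ≤ n+1) := by omega
          have hc2 : (m+1 : Nat) = m+1 ∧ 1 ≤ n+1 ∧ n+1 ≤ n+1 := by omega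
          rw [if_neg hc1, if_pos hc2]
          simp
        · rw [get2_set2_ne _ _ _ _ _ _ (Or.inl him),
            get2_set2_ne _ _ _ _ _ _ (Or.inl hi0),
            ih r (by omega) hr]
          split_ifs with h1 h2 h3 h4 <;> first | rfl | omega
    · rw [get2_set2_ne _ _ _ _ _ _ (Or.inr hjn),
        get2_set2_ne _ _ _ _ _ _ (Or.inr hjn), ih r (by omega) hr]
      split_ifs with h1 h2 h3 h4 <;> first | rfl | omega

-- inner interior loop, fixed row i0+1
theorem loop3in_get2 (arr : List (List Int)) (i0 M N : Nat) (hM : i0 + 1 < M) :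
    ∀ (n : Nat) (r : List (List Int)), n + 1 ≤ N → Shape r M N → ∀ i j,
      get2 ((List.range n).foldl (fun r' k => set2 r' (i0+1) (k+1) (get2 arr i0 k)) r) i j =
      if i = i0 + 1 ∧ 1 ≤ j ∧ j ≤ n then get2 arr i0 (j-1)
      else get2 r i j := by
  intro n
  induction n with
  | zero =>
    intro r _ _ i j
    simp only [List.range_zero, List.foldl_nil]
    split_ifs with h1 h2 <;> first | rfl | omega
  | succ n ih =>
    intro r hN hr i j
    rw [List.range_succ, List.foldl_append, List.foldl_cons, List.foldl_nil]
    set r' := (List.range n).foldl (fun r' k => set2 r' (i0+1) (k+1) (get2 arr i0 k)) r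
      with hr'def
    have hshape' : Shape r' M N := shape_foldl _ (fun r k h => shape_set2 h _ _ _) _ r hr
    have hC : r'.length = M := hshape'.1
    have hD : (r'.getD (i0+1) []).length = N := hshape'.2 (i0+1) (by omega)
    by_cases hc : i = i0 + 1 ∧ j = n + 1
    · obtain ⟨hi, hj⟩ := hc; subst hi; subst hj
      rw [get2_set2_self _ _ _ _ (by omega) (by omega)]
      have hcond : i0+1 = i0+1 ∧ 1 ≤ n+1 ∧ n+1 ≤ n+1 := by omega
      rw [if_pos hcond]
      simp
    · have hne : i ≠ i0 + 1 ∨ j ≠ n + 1 := by tauto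
      rw [get2_set2_ne _ _ _ _ _ _ hne, ih r (by omega) hr]
      split_ifs with h1 h2 <;> first | rfl | omega

-- outer interior loop: rows 1..m, columns 1..n
theorem loop3_get2 (arr : List (List Int)) (n M N : Nat) (hN : n + 1 ≤ N) :
    ∀ (m : Nat) (r : List (List Int)), m + 1 ≤ M → Shape r M N → ∀ i j,
      get2 ((List.range m).foldl (fun r i0 =>
        (List.range n).foldl (fun r' k => set2 r' (i0+1) (k+1) (get2 arr i0 k)) r) r) i j =
      if 1 ≤ i ∧ i ≤ m ∧ 1 ≤ j ∧ j ≤ n then get2 arr (i-1) (j-1)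
      else get2 r i j := by
  intro m
  induction m with
  | zero =>
    intro r _ _ i j
    simp only [List.range_zero, List.foldl_nil]
    split_ifs with h1 h2 <;> first | rfl | omega
  | succ m ih =>
    intro r hM hr i j
    rw [List.range_succ, List.foldl_append, List.foldl_cons, List.foldl_nil]
    set r' := (List.range m).foldl (fun r i0 =>
      (List.range n).foldl (fun r' k => set2 r' (i0+1) (k+1) (get2 arr i0 k)) r) r
      with hr'def
    have hshape' : Shape r' M N := by
      refine shape_foldl _ (fun r i0 h => ?_) _ r hr
      exact shape_foldl _ (fun r k h => shape_set2 h _ _ _) _ r h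
    rw [loop3in_get2 arr m M N (by omega) n r' hN hshape' i j,
      ih r (by omega) hr]
    split_ifs with h1 h2 h3 h4 <;> first | rfl | omega | (congr 2; omega)

theorem shape_replicate (m n : Nat) :
    Shape (List.replicate (m+2) (List.replicate (n+2) (0:Int))) (m+2) (n+2) := by
  refine ⟨by simp, fun k hk => ?_⟩
  rw [List.getD_eq_getElem?_getD, List.getElem?_replicate, if_pos hk]
  simp

-- the corner writes + interior double loop, over a generic grid r of the right shape
theorem tail_get2 (arr : List (List Int)) (m n : Nat) (r : List (List Int))
    (hr : Shape r (m+2) (n+2)) (i j : Nat) :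
    get2 ((List.range m).foldl (fun r i0 =>
        (List.range n).foldl (fun r' k => set2 r' (i0+1) (k+1) (get2 arr i0 k)) r)
      (set2 (set2 (set2 (set2 r 0 0 (get2 arr 0 0)) 0 (n+1) (get2 arr 0 (n-1)))
        (m+1) 0 (get2 arr (m-1) 0)) (m+1) (n+1) (get2 arr (m-1) (n-1)))) i j =
    if 1 ≤ i ∧ i ≤ m ∧ 1 ≤ j ∧ j ≤ n then get2 arr (i-1) (j-1)
    else if i = 0 ∧ j = 0 then get2 arr 0 0
    else if i = 0 ∧ j = n+1 then get2 arr 0 (n-1)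
    else if i = m+1 ∧ j = 0 then get2 arr (m-1) 0
    else if i = m+1 ∧ j = n+1 then get2 arr (m-1) (n-1)
    else get2 r i j := by
  set c1 := set2 r 0 0 (get2 arr 0 0) with hc1
  set c2 := set2 c1 0 (n+1) (get2 arr 0 (n-1)) with hc2
  set c3 := set2 c2 (m+1) 0 (get2 arr (m-1) 0) with hc3
  set c4 := set2 c3 (m+1) (n+1) (get2 arr (m-1) (n-1)) with hc4
  have s1 : Shape c1 (m+2) (n+2) := by rw [hc1]; exact shape_set2 hr _ _ _
  have s2 : Shape c2 (m+2) (n+2) := by rw [hc2]; exact shape_set2 s1 _ _ _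
  have s3 : Shape c3 (m+2) (n+2) := by rw [hc3]; exact shape_set2 s2 _ _ _
  have s4 : Shape c4 (m+2) (n+2) := by rw [hc4]; exact shape_set2 s3 _ _ _
  rw [loop3_get2 arr n (m+2) (n+2) (by omega) m c4 (by omega) s4 i j]
  by_cases hint : 1 ≤ i ∧ i ≤ m ∧ 1 ≤ j ∧ j ≤ n
  · rw [if_pos hint, if_pos hint]
  · rw [if_neg hint, if_neg hint]
    by_cases hC4 : i = m+1 ∧ j = n+1
    · obtain ⟨hi1, hj1⟩ := hC4; subst hi1; subst hj1
      have hl := s3.1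
      have hrl := s3.2 (m+1) (by omega)
      rw [hc4, get2_set2_self _ _ _ _ (by omega) (by omega)]
      have h1 : ¬ ((m+1:Nat) = 0 ∧ (n+1:Nat) = 0) := by omega
      have h2 : ¬ ((m+1:Nat) = 0 ∧ n+1 = n+1) := by omega
      have h3 : ¬ ((m+1:Nat) = m+1 ∧ (n+1:Nat) = 0) := by omega
      rw [if_neg h1, if_neg h2, if_neg h3, if_pos ⟨rfl, rfl⟩]
    · rw [hc4, get2_set2_ne _ _ _ _ _ _ (by tauto)]
      by_cases hC3 : i = m+1 ∧ j = 0
      · obtain ⟨hi1, hj1⟩ := hC3; subst hi1; subst hj1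
        have hl := s2.1
        have hrl := s2.2 (m+1) (by omega)
        rw [hc3, get2_set2_self _ _ _ _ (by omega) (by omega)]
        have h1 : ¬ ((m+1:Nat) = 0 ∧ (0:Nat) = 0) := by omega
        have h2 : ¬ ((m+1:Nat) = 0 ∧ (0:Nat) = n+1) := by omega
        rw [if_neg h1, if_neg h2, if_pos ⟨rfl, rfl⟩]
      · rw [hc3, get2_set2_ne _ _ _ _ _ _ (by tauto)]
        by_cases hC2 : i = 0 ∧ j = n+1
        · obtain ⟨hi1, hj1⟩ := hC2; subst hi1; subst hj1
          have hl := s1.1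
          have hrl := s1.2 0 (by omega)
          rw [hc2, get2_set2_self _ _ _ _ (by omega) (by omega)]
          have h1 : ¬ ((0:Nat) = 0 ∧ (n+1:Nat) = 0) := by omega
          rw [if_neg h1, if_pos ⟨rfl, rfl⟩]
        · rw [hc2, get2_set2_ne _ _ _ _ _ _ (by tauto)]
          by_cases hC1 : i = 0 ∧ j = 0
          · obtain ⟨hi1, hj1⟩ := hC1; subst hi1; subst hj1
            have hl := hr.1
            have hrl := hr.2 0 (by omega)
            rw [hc1, get2_set2_self _ _ _ _ (by omega) (by omega)]
            rw [if_pos ⟨rfl, rfl⟩]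
          · rw [hc1, get2_set2_ne _ _ _ _ _ _ (by tauto)]
            rw [if_neg hC1]
            have h2' : ¬ (i = 0 ∧ j = n+1) := hC2
            have h3' : ¬ (i = m+1 ∧ j = 0) := hC3
            have h4' : ¬ (i = m+1 ∧ j = n+1) := hC4
            rw [if_neg h2', if_neg h3', if_neg h4']

-- the full grid of A, cell by cell: every cell is the clamped read of arr
theorem expan_get2 (arr : List (List Int)) (har : arr ≠ []) (hn : 0 < (arr.getD 0 []).length)
    (i j : Nat) (hi : i < arr.length + 2) (hj : j < (arr.getD 0 []).length + 2) :
    get2 (expan arr) i j =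
      (arr.getD (min (i-1) (arr.length-1)) []).getD (min (j-1) ((arr.getD 0 []).length-1)) 0 := by
  set m := arr.length with hm
  set n := (arr.getD 0 []).length with hn'
  have hm1 : 1 ≤ m := by
    cases arr with
    | nil => exact absurd rfl har
    | cons a t => simp [hm]
  show get2 (expan arr) i j = get2 arr (min (i-1) (m-1)) (min (j-1) (n-1))
  unfold expan
  simp only [← hm, ← hn']
  have h0 := shape_replicate m n
  have h1 : Shape ((List.range m).foldl (fun r k =>
      set2 (set2 r (k+1) 0 (get2 arr k 0)) (k+1) (n+1) (get2 arr k (n-1)))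
      (List.replicate (m+2) (List.replicate (n+2) (0:Int)))) (m+2) (n+2) :=
    shape_foldl _ (fun r k h => shape_set2 (shape_set2 h _ _ _) _ _ _) _ _ h0
  have h2 : Shape ((List.range n).foldl (fun r k =>
      set2 (set2 r 0 (k+1) (get2 arr 0 k)) (m+1) (k+1) (get2 arr (m-1) k))
      ((List.range m).foldl (fun r k =>
        set2 (set2 r (k+1) 0 (get2 arr k 0)) (k+1) (n+1) (get2 arr k (n-1)))
        (List.replicate (m+2) (List.replicate (n+2) (0:Int))))) (m+2) (n+2) :=
    shape_foldl _ (fun r k h => shape_set2 (shape_set2 h _ _ _) _ _ _) _ _ h1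
  rw [tail_get2 arr m n _ h2 i j]
  by_cases hint : 1 ≤ i ∧ i ≤ m ∧ 1 ≤ j ∧ j ≤ n
  · rw [if_pos hint]
    have e1 : min (i-1) (m-1) = i-1 := by omega
    have e2 : min (j-1) (n-1) = j-1 := by omega
    rw [e1, e2]
  · rw [if_neg hint]
    by_cases hC1 : i = 0 ∧ j = 0
    · obtain ⟨hi1, hj1⟩ := hC1; subst hi1; subst hj1
      rw [if_pos ⟨rfl, rfl⟩]
      have e1 : min (0-1) (m-1) = 0 := by omega
      have e2 : min (0-1) (n-1) = 0 := by omega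
      rw [e1, e2]
    · rw [if_neg hC1]
      by_cases hC2 : i = 0 ∧ j = n+1
      · obtain ⟨hi1, hj1⟩ := hC2; subst hi1; subst hj1
        rw [if_pos ⟨rfl, rfl⟩]
        have e1 : min (0-1) (m-1) = 0 := by omega
        have e2 : min (n+1-1) (n-1) = n-1 := by omega
        rw [e1, e2]
      · rw [if_neg hC2]
        by_cases hC3 : i = m+1 ∧ j = 0
        · obtain ⟨hi1, hj1⟩ := hC3; subst hi1; subst hj1
          rw [if_pos ⟨rfl, rfl⟩]
          have e1 : min (m+1-1) (m-1) = m-1 := by omega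
          have e2 : min (0-1) (n-1) = 0 := by omega
          rw [e1, e2]
        · rw [if_neg hC3]
          by_cases hC4 : i = m+1 ∧ j = n+1
          · obtain ⟨hi1, hj1⟩ := hC4; subst hi1; subst hj1
            rw [if_pos ⟨rfl, rfl⟩]
            have e1 : min (m+1-1) (m-1) = m-1 := by omega
            have e2 : min (n+1-1) (n-1) = n-1 := by omega
            rw [e1, e2]
          · rw [if_neg hC4]
            rw [loop2_get2 arr m (m+2) (n+2) (by omega) n _ (by omega) h1 i j]
            by_cases hb1 : i = 0 ∧ 1 ≤ j ∧ j ≤ n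
            · obtain ⟨hi1, hj1, hj2⟩ := hb1; subst hi1
              rw [if_pos ⟨rfl, hj1, hj2⟩]
              have e1 : min (0-1) (m-1) = 0 := by omega
              have e2 : min (j-1) (n-1) = j-1 := by omega
              rw [e1, e2]
            · rw [if_neg hb1]
              by_cases hb2 : i = m+1 ∧ 1 ≤ j ∧ j ≤ n
              · obtain ⟨hi1, hj1, hj2⟩ := hb2; subst hi1
                rw [if_pos ⟨rfl, hj1, hj2⟩]
                have e1 : min (m+1-1) (m-1) = m-1 := by omega
                have e2 : min (j-1) (n-1) = j-1 := by omega
                rw [e1, e2]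
              · rw [if_neg hb2]
                rw [loop1_get2 arr n (m+2) (n+2) (by omega) m _ (by omega) h0 i j]
                by_cases hb3 : 1 ≤ i ∧ i ≤ m ∧ j = 0
                · obtain ⟨hi1, hi2, hj1⟩ := hb3; subst hj1
                  rw [if_pos ⟨hi1, hi2, rfl⟩]
                  have e1 : min (i-1) (m-1) = i-1 := by omega
                  have e2 : min (0-1) (n-1) = 0 := by omega
                  rw [e1, e2]
                · rw [if_neg hb3]
                  by_cases hb4 : 1 ≤ i ∧ i ≤ m ∧ j = n+1
                  · obtain ⟨hi1, hi2, hj1⟩ := hb4; subst hj1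
                    rw [if_pos ⟨hi1, hi2, rfl⟩]
                    have e1 : min (i-1) (m-1) = i-1 := by omega
                    have e2 : min (n+1-1) (n-1) = n-1 := by omega
                    rw [e1, e2]
                  · -- every cell of the (m+2)×(n+2) grid is covered above
                    omega

theorem shape_expan (arr : List (List Int)) :
    Shape (expan arr) (arr.length + 2) ((arr.getD 0 []).length + 2) := by
  unfold expan
  refine shape_foldl _ (fun r i0 h => ?_) _ _
    (shape_set2 (shape_set2 (shape_set2 (shape_set2
      (shape_foldl _ (fun r k h => shape_set2 (shape_set2 h _ _ _) _ _ _) _ _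
        (shape_foldl _ (fun r k h => shape_set2 (shape_set2 h _ _ _) _ _ _) _ _
          (shape_replicate _ _))) _ _ _) _ _ _) _ _ _) _ _ _)
  exact shape_foldl _ (fun r k h => shape_set2 h _ _ _) _ _ h

-- a list of known length whose getD values match g is the map of g over the range
theorem eq_map_range_of_getD {α : Type} [Inhabited α] (l : List α) (N : Nat) (g : Nat → α)
    (d : α) (hl : l.length = N) (h : ∀ j < N, l.getD j d = g j) :
    l = (List.range N).map g := by
  apply List.ext_getElem
  · simp [hl]
  · intro k h1 h2
    have hk : k < N := by simpa [hl] using h1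
    have := h k hk
    rw [List.getD_eq_getElem l d h1] at this
    simpa using this

theorem expan_eq_alt (arr : List (List Int)) (har : arr ≠ [])
    (hn : 0 < (arr.getD 0 []).length) : expan arr = expan_alt arr := by
  set m := arr.length with hm
  set n := (arr.getD 0 []).length with hn'
  have hshape := shape_expan arr
  unfold expan_alt
  simp only [← hm, ← hn']
  apply eq_map_range_of_getD _ _ _ ([] : List Int) hshape.1
  intro i hi
  apply eq_map_range_of_getD _ _ _ (0:Int) (hshape.2 i hi)
  intro j hj
  exact expan_get2 arr har hn i j hi hj

-- ===== VERDICT (by name: the statement is the Claim_ definition above) =====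
theorem expan_spec : Claim_equal_expan := by
  intro arr _ hpre
  unfold Spec_expan
  exact expan_eq_alt arr hpre.1 hpre.2.1
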